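-- pv_equiv track=rewrite | github.com/LoveBetween/Scrabbly | scrabbleSolver.py | find_placement_vertical_perpendicular
-- ===== SOURCE A (Python) =====
-- def find_placement_vertical_perpendicular(grid, x, y):
--     placement = "_"
--     before = 1
--     while x - before >= 0 and grid[x - before][y] != "_":
--         placement = grid[x - before][y] + placement
--         before += 1
--     after = 1
--     while x + after < 15 and grid[x + after][y] != "_":
--         placement += grid[x + after][y]
--         after += 1
--     return placement
-- ===== SOURCE B (Python) =====
-- def find_placement_vertical_perpendicular(grid, x, y):
--     i = x
--     while i > 0 and grid[i - 1][y] != "_":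
--         i -= 1
--     j = x + 1
--     while j < 15 and grid[j][y] != "_":
--         j += 1
--     return "".join(grid[r][y] for r in range(i, x)) + "_" + "".join(grid[r][y] for r in range(x + 1, j))
-- ===== Notes on version B (the rewrite author's own statement) =====
-- stated objective: alternative
-- what changed: B separates boundary-finding from string-building: it first locates the run endpoints i and j with index-only scans, then assembles each run in one pass with ''.join over range slices, instead of A's loops that grow the placement string cell by cell while walking.
import Mathlib
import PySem

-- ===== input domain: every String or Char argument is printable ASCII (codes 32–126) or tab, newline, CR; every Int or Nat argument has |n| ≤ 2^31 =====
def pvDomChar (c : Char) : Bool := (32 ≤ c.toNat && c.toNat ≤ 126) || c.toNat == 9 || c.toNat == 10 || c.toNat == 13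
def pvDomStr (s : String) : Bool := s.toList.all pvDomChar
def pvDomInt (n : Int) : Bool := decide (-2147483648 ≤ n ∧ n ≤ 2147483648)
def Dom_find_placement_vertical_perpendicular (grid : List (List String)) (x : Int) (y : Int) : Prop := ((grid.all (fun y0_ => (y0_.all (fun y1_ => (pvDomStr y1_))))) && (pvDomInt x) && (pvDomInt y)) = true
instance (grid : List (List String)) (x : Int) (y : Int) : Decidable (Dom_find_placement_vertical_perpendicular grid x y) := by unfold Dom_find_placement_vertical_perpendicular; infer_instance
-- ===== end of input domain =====

-- B first locates the run endpoints with index-only scans, then joins the runs from range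
-- slices in one pass each, instead of A's cell-by-cell string growth while walking; the
-- equivalence claimed is about the return value on every input (neither mutates arguments).

-- ===== PORT A =====
-- grid[i][y], total form: pyGetD with defaults (where Python would raise the behaviour is not
-- claimed — the loops below touch exactly the cells A's loops touch, so both ports diverge
-- from Python only on inputs where Python raises)
def pvCell (grid : List (List String)) (y i : Int) : String :=
  PySem.List.pyGetD (PySem.List.pyGetD grid i []) y ""

-- while x - before >= 0 and grid[x-before][y] != "_": placement = grid[x-before][y] + placement
-- (fuel x.toNat + 1 bounds the iteration count: before starts at 1 and x - before ≥ 0 fails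
-- after at most x steps; running out of fuel can only happen at the loop's own exit point)
def pvUpA (grid : List (List String)) (y x : Int) : Nat → Int → String → String
  | 0, _, placement => placement
  | f+1, before, placement =>
    if 0 ≤ x - before ∧ pvCell grid y (x - before) ≠ "_" then
      pvUpA grid y x f (before + 1) (pvCell grid y (x - before) ++ placement)
    else placement

-- while x + after < 15 and grid[x+after][y] != "_": placement += grid[x+after][y]
-- (fuel (15 - x).toNat + 1 bounds the iterations: x + after < 15 fails after ≤ 14 - x steps)
def pvDownA (grid : List (List String)) (y x : Int) : Nat → Int → String → String
  | 0, _, placement => placement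
  | f+1, after, placement =>
    if x + after < 15 ∧ pvCell grid y (x + after) ≠ "_" then
      pvDownA grid y x f (after + 1) (placement ++ pvCell grid y (x + after))
    else placement

def find_placement_vertical_perpendicular (grid : List (List String)) (x : Int) (y : Int) : String :=
  pvDownA grid y x ((15 - x).toNat + 1) 1 (pvUpA grid y x (x.toNat + 1) 1 "_")

-- ===== PORT B =====
-- while i > 0 and grid[i-1][y] != "_": i -= 1   (same fuel bound as A's upward walk)
def pvUpIdx (grid : List (List String)) (y : Int) : Nat → Int → Int
  | 0, i => i
  | f+1, i => if 0 < i ∧ pvCell grid y (i - 1) ≠ "_" then pvUpIdx grid y f (i - 1) else i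

-- while j < 15 and grid[j][y] != "_": j += 1
def pvDownIdx (grid : List (List String)) (y : Int) : Nat → Int → Int
  | 0, j => j
  | f+1, j => if j < 15 ∧ pvCell grid y j ≠ "_" then pvDownIdx grid y f (j + 1) else j

-- "".join(grid[r][y] for r in range(i, x)) + "_" + "".join(grid[r][y] for r in range(x+1, j))
def find_placement_vertical_perpendicular_alt (grid : List (List String)) (x : Int) (y : Int) : String :=
  PySem.Str.join "" ((PySem.List.pyRange (pvUpIdx grid y (x.toNat + 1) x) x 1).map (fun r => pvCell grid y r))
    ++ "_"
    ++ PySem.Str.join "" ((PySem.List.pyRange (x + 1) (pvDownIdx grid y ((15 - x).toNat + 1) (x + 1)) 1).map (fun r => pvCell grid y r))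

-- ===== PRECONDITION & SPEC =====
-- Pre_ is exactly the inputs on which the Python A returns (no IndexError): the upward walk
-- from x-1 and the downward walk from x+1 only ever reach rows that exist (the downward walk
-- may reach them by Python's negative-index wraparound) and that y indexes, until a blank
-- cell or the walk's own bound stops them.
def Pre_find_placement_vertical_perpendicular (grid : List (List String)) (x : Int) (y : Int) : Prop :=
  (x ≤ (grid.length : Int) ∧
    ∀ i ∈ List.range grid.length, (i : Int) < x →
      ((∀ t ∈ List.range grid.length, (i : Int) < (t : Int) → (t : Int) < x →
          (PySem.Raise.InRange (PySem.List.pyGetD grid (t : Int) []).length y ∧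
           PySem.List.pyGetD (PySem.List.pyGetD grid (t : Int) []) y "" ≠ "_")) →
        PySem.Raise.InRange (PySem.List.pyGetD grid (i : Int) []).length y))
  ∧ ((x + 1 < 15 → -(grid.length : Int) ≤ x + 1) ∧
    ∀ j ∈ PySem.List.pyRange (-(grid.length : Int)) 15 1, x + 1 ≤ j →
      ((∀ t ∈ PySem.List.pyRange (-(grid.length : Int)) 15 1, x + 1 ≤ t → t < j →
          (PySem.Raise.InRange grid.length t ∧
           PySem.Raise.InRange (PySem.List.pyGetD grid t []).length y ∧
           PySem.List.pyGetD (PySem.List.pyGetD grid t []) y "" ≠ "_")) →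
        (PySem.Raise.InRange grid.length j ∧
         PySem.Raise.InRange (PySem.List.pyGetD grid j []).length y)))
instance (grid : List (List String)) (x : Int) (y : Int) : Decidable (Pre_find_placement_vertical_perpendicular grid x y) := by unfold Pre_find_placement_vertical_perpendicular; infer_instance

def pvWitness_find_placement_vertical_perpendicular : List (List String) × Int × Int :=
  (List.replicate 15 ["a"], 7, 0)

def Spec_find_placement_vertical_perpendicular (grid : List (List String)) (x : Int) (y : Int) (out : String) : Prop := out = find_placement_vertical_perpendicular_alt grid x y
instance (grid : List (List String)) (x : Int) (y : Int) (out : String) : Decidable (Spec_find_placement_vertical_perpendicular grid x y out) := by unfold Spec_find_placement_vertical_perpendicular; infer_instance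

-- ===== CLAIM (what is proved, stated in full; the proofs are below) =====
def Claim_equal_find_placement_vertical_perpendicular : Prop := ∀ (grid : List (List String)) (x : Int) (y : Int), Dom_find_placement_vertical_perpendicular grid x y → Pre_find_placement_vertical_perpendicular grid x y → Spec_find_placement_vertical_perpendicular grid x y (find_placement_vertical_perpendicular grid x y)

-- ===== LEMMAS AND PROOFS =====

theorem pvStr_ext {s t : String} (h : s.toList = t.toList) : s = t := by
  have := congrArg String.ofList h; simpa using this

theorem pvJoin_nil : PySem.Str.join "" ([] : List String) = "" := rfl

theorem pvJoin_cons (c : String) (l : List String) :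
    PySem.Str.join "" (c :: l) = c ++ PySem.Str.join "" l := by
  apply pvStr_ext
  simp [PySem.Str.join, PySem.Chars.join, List.intercalate]
  cases l <;> simp

theorem pvJoin_append_singleton (l : List String) (c : String) :
    PySem.Str.join "" (l ++ [c]) = PySem.Str.join "" l ++ c := by
  induction l with
  | nil => simp [pvJoin_cons, pvJoin_nil]
  | cons d l ih => rw [List.cons_append, pvJoin_cons, pvJoin_cons, ih, String.append_assoc]

-- the upward run of non-"_" cells ending at index j (in top-to-bottom order)
def pvRunUp (grid : List (List String)) (y : Int) (j : Int) : List String :=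
  if j < 0 ∨ pvCell grid y j = "_" then []
  else pvRunUp grid y (j - 1) ++ [pvCell grid y j]
termination_by (j + 1).toNat
decreasing_by omega

-- the downward run of non-"_" cells starting at index j, stopping at 15
def pvRunDown (grid : List (List String)) (y : Int) (j : Int) : List String :=
  if 15 ≤ j ∨ pvCell grid y j = "_" then []
  else pvCell grid y j :: pvRunDown grid y (j + 1)
termination_by (15 - j).toNat
decreasing_by omega

theorem pvUpA_eq (grid : List (List String)) (y x : Int) :
    ∀ (m f : Nat) (j : Int) (p : String), m = (j + 1).toNat → m ≤ f →
      pvUpA grid y x f (x - j) p = PySem.Str.join "" (pvRunUp grid y j) ++ p := by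
  intro m
  induction m with
  | zero =>
    intro f j p hm _
    have hj : j < 0 := by omega
    have hres : pvUpA grid y x f (x - j) p = p := by
      cases f with
      | zero => rfl
      | succ f => simp only [pvUpA]; rw [if_neg]; intro h; omega
    rw [hres, pvRunUp, if_pos (Or.inl hj), pvJoin_nil]
    simp
  | succ k ih =>
    intro f j p hm hf
    have hj : 0 ≤ j := by omega
    obtain ⟨f, rfl⟩ : ∃ f', f = f' + 1 := ⟨f - 1, by omega⟩
    have hxj : x - (x - j) = j := by omega
    by_cases hcell : pvCell grid y j = "_"
    · have hres : pvUpA grid y x (f + 1) (x - j) p = p := by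
        simp only [pvUpA]; rw [if_neg]; rw [hxj]; intro h; exact h.2 hcell
      rw [hres, pvRunUp, if_pos (Or.inr hcell), pvJoin_nil]
      simp
    · have hres : pvUpA grid y x (f + 1) (x - j) p
          = pvUpA grid y x f (x - (j - 1)) (pvCell grid y j ++ p) := by
        simp only [pvUpA]; rw [if_pos]
        · rw [hxj]; congr 1; omega
        · rw [hxj]; exact ⟨hj, hcell⟩
      have hR : pvRunUp grid y j = pvRunUp grid y (j - 1) ++ [pvCell grid y j] := by
        rw [pvRunUp, if_neg]; push Not; exact ⟨by omega, hcell⟩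
      rw [hres, ih f (j - 1) (pvCell grid y j ++ p) (by omega) (by omega), hR,
        pvJoin_append_singleton, String.append_assoc]

theorem pvDownA_eq (grid : List (List String)) (y x : Int) :
    ∀ (m f : Nat) (j : Int) (p : String), m = (15 - j).toNat → m ≤ f →
      pvDownA grid y x f (j - x) p = p ++ PySem.Str.join "" (pvRunDown grid y j) := by
  intro m
  induction m with
  | zero =>
    intro f j p hm _
    have hj : 15 ≤ j := by omega
    have hres : pvDownA grid y x f (j - x) p = p := by
      cases f with
      | zero => rfl
      | succ f => simp only [pvDownA]; rw [if_neg]; intro h; omega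
    rw [hres, pvRunDown, if_pos (Or.inl hj), pvJoin_nil]
    simp
  | succ k ih =>
    intro f j p hm hf
    have hj : j < 15 := by omega
    obtain ⟨f, rfl⟩ : ∃ f', f = f' + 1 := ⟨f - 1, by omega⟩
    have hxj : x + (j - x) = j := by omega
    by_cases hcell : pvCell grid y j = "_"
    · have hres : pvDownA grid y x (f + 1) (j - x) p = p := by
        simp only [pvDownA]; rw [if_neg]; rw [hxj]; intro h; exact h.2 hcell
      rw [hres, pvRunDown, if_pos (Or.inr hcell), pvJoin_nil]
      simp
    · have hres : pvDownA grid y x (f + 1) (j - x) p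
          = pvDownA grid y x f ((j + 1) - x) (p ++ pvCell grid y j) := by
        simp only [pvDownA]; rw [if_pos]
        · rw [hxj]; congr 1; omega
        · rw [hxj]; exact ⟨hj, hcell⟩
      have hR : pvRunDown grid y j = pvCell grid y j :: pvRunDown grid y (j + 1) := by
        rw [pvRunDown, if_neg]; push Not; exact ⟨by omega, hcell⟩
      rw [hres, ih f (j + 1) (p ++ pvCell grid y j) (by omega) (by omega), hR,
        pvJoin_cons, String.append_assoc]

theorem pvUpIdx_le (grid : List (List String)) (y : Int) :
    ∀ (f : Nat) (i : Int), pvUpIdx grid y f i ≤ i := by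
  intro f
  induction f with
  | zero => intro i; simp [pvUpIdx]
  | succ f ih =>
    intro i
    simp only [pvUpIdx]
    split
    · exact le_trans (ih (i - 1)) (by omega)
    · exact le_refl i

theorem pvDownIdx_ge (grid : List (List String)) (y : Int) :
    ∀ (f : Nat) (j : Int), j ≤ pvDownIdx grid y f j := by
  intro f
  induction f with
  | zero => intro j; simp [pvDownIdx]
  | succ f ih =>
    intro j
    simp only [pvDownIdx]
    split
    · exact le_trans (by omega) (ih (j + 1))
    · exact le_refl j

theorem pvUpIdx_eq (grid : List (List String)) (y : Int) :
    ∀ (m f : Nat) (i : Int), m = i.toNat → m ≤ f →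
      (PySem.List.pyRange (pvUpIdx grid y f i) i 1).map (fun r => pvCell grid y r)
        = pvRunUp grid y (i - 1) := by
  intro m
  induction m with
  | zero =>
    intro f i hm _
    have hi : i ≤ 0 := by omega
    have hres : pvUpIdx grid y f i = i := by
      cases f with
      | zero => rfl
      | succ f => simp only [pvUpIdx]; rw [if_neg]; intro h; omega
    rw [hres, PySem.List.pyRange_one_eq_nil (le_refl i), List.map_nil,
      pvRunUp, if_pos (Or.inl (by omega))]
  | succ k ih =>
    intro f i hm hf
    have hi : 1 ≤ i := by omega
    obtain ⟨f, rfl⟩ : ∃ f', f = f' + 1 := ⟨f - 1, by omega⟩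
    by_cases hcell : pvCell grid y (i - 1) = "_"
    · have hres : pvUpIdx grid y (f + 1) i = i := by
        simp only [pvUpIdx]; rw [if_neg]; intro h; exact h.2 hcell
      rw [hres, PySem.List.pyRange_one_eq_nil (le_refl i), List.map_nil,
        pvRunUp, if_pos (Or.inr hcell)]
    · have hres : pvUpIdx grid y (f + 1) i = pvUpIdx grid y f (i - 1) := by
        simp only [pvUpIdx]; rw [if_pos ⟨by omega, hcell⟩]
      have hle : pvUpIdx grid y f (i - 1) ≤ i - 1 := pvUpIdx_le grid y f (i - 1)
      have hsplit : PySem.List.pyRange (pvUpIdx grid y f (i - 1)) i 1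
          = PySem.List.pyRange (pvUpIdx grid y f (i - 1)) (i - 1) 1 ++ [i - 1] := by
        have := PySem.List.pyRange_one_succ_right (a := pvUpIdx grid y f (i - 1)) (b := i - 1) hle
        have hi1 : i - 1 + 1 = i := by omega
        rw [hi1] at this; exact this
      have hR : pvRunUp grid y (i - 1) = pvRunUp grid y (i - 1 - 1) ++ [pvCell grid y (i - 1)] := by
        rw [pvRunUp, if_neg]; push Not; exact ⟨by omega, hcell⟩
      rw [hres, hsplit, List.map_append, ih f (i - 1) (by omega) (by omega), hR]
      simp

theorem pvDownIdx_eq (grid : List (List String)) (y : Int) :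
    ∀ (m f : Nat) (j : Int), m = (15 - j).toNat → m ≤ f →
      (PySem.List.pyRange j (pvDownIdx grid y f j) 1).map (fun r => pvCell grid y r)
        = pvRunDown grid y j := by
  intro m
  induction m with
  | zero =>
    intro f j hm _
    have hj : 15 ≤ j := by omega
    have hres : pvDownIdx grid y f j = j := by
      cases f with
      | zero => rfl
      | succ f => simp only [pvDownIdx]; rw [if_neg]; intro h; omega
    rw [hres, PySem.List.pyRange_one_eq_nil (le_refl j), List.map_nil,
      pvRunDown, if_pos (Or.inl hj)]
  | succ k ih =>
    intro f j hm hf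
    have hj : j < 15 := by omega
    obtain ⟨f, rfl⟩ : ∃ f', f = f' + 1 := ⟨f - 1, by omega⟩
    by_cases hcell : pvCell grid y j = "_"
    · have hres : pvDownIdx grid y (f + 1) j = j := by
        simp only [pvDownIdx]; rw [if_neg]; intro h; exact h.2 hcell
      rw [hres, PySem.List.pyRange_one_eq_nil (le_refl j), List.map_nil,
        pvRunDown, if_pos (Or.inr hcell)]
    · have hres : pvDownIdx grid y (f + 1) j = pvDownIdx grid y f (j + 1) := by
        simp only [pvDownIdx]; rw [if_pos ⟨hj, hcell⟩]
      have hge : j + 1 ≤ pvDownIdx grid y f (j + 1) := pvDownIdx_ge grid y f (j + 1)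
      have hsplit : PySem.List.pyRange j (pvDownIdx grid y f (j + 1)) 1
          = j :: PySem.List.pyRange (j + 1) (pvDownIdx grid y f (j + 1)) 1 :=
        PySem.List.pyRange_one_cons (by omega)
      have hR : pvRunDown grid y j = pvCell grid y j :: pvRunDown grid y (j + 1) := by
        rw [pvRunDown, if_neg]; push Not; exact ⟨by omega, hcell⟩
      rw [hres, hsplit, List.map_cons, ih f (j + 1) (by omega) (by omega), hR]

-- ===== VERDICT (by name: the statement is the Claim_ definition above) =====
-- the two ports agree on every input (Pre_ is needed only for faithfulness to Python, not here)
theorem find_placement_vertical_perpendicular_spec : Claim_equal_find_placement_vertical_perpendicular := by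
  intro grid x y _ _
  unfold Spec_find_placement_vertical_perpendicular
  unfold find_placement_vertical_perpendicular find_placement_vertical_perpendicular_alt
  have hup : pvUpA grid y x (x.toNat + 1) 1 "_"
      = PySem.Str.join "" (pvRunUp grid y (x - 1)) ++ "_" := by
    have h := pvUpA_eq grid y x (x - 1 + 1).toNat (x.toNat + 1) (x - 1) "_" rfl (by omega)
    have h1 : x - (x - 1) = 1 := by omega
    rw [h1] at h; exact h
  have hdown := pvDownA_eq grid y x (15 - (x + 1)).toNat ((15 - x).toNat + 1) (x + 1)
      (PySem.Str.join "" (pvRunUp grid y (x - 1)) ++ "_") rfl (by omega)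
  have h2 : (x + 1) - x = 1 := by omega
  rw [h2] at hdown
  rw [hup, hdown]
  rw [pvUpIdx_eq grid y x.toNat (x.toNat + 1) x rfl (by omega)]
  rw [pvDownIdx_eq grid y (15 - (x + 1)).toNat ((15 - x).toNat + 1) (x + 1) rfl (by omega)]
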